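-- pv_equiv track=rewrite | github.com/sh95fit/CodingTest | 프로그래머스/lv0/120843. 공 던지기/공 던지기.py | solution
-- ===== SOURCE A (Python) =====
-- def solution(numbers, k):
--     answer = 0
--     count = (k-1)*2
--     num = len(numbers)
--     if count >= num :
--         while(len(numbers)<=count) :
--             answer = count - num
--             count = count - num
--     else :
--         answer = count
--     return numbers[count]
-- ===== SOURCE B (Python) =====
-- def solution(numbers, k):
--     return numbers[((k - 1) * 2) % len(numbers)]
-- ===== Notes on version B (the rewrite author's own statement) =====
-- stated objective: simpler
-- what changed: Replaces A's branching and repeated-subtraction reduction loop with a single one-line modulo-indexed lookup numbers[((k-1)*2) % len(numbers)].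
-- crash fix: On non-empty numbers with (k-1)*2 < -len(numbers) (k well below 0) A raises IndexError while B returns numbers[((k-1)*2) % len(numbers)]; A also raises IndexError or loops forever on empty numbers, where B raises too (outside Pre_). — e.g. on solution([5], 0): A raises IndexError, B returns 5
import Mathlib
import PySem

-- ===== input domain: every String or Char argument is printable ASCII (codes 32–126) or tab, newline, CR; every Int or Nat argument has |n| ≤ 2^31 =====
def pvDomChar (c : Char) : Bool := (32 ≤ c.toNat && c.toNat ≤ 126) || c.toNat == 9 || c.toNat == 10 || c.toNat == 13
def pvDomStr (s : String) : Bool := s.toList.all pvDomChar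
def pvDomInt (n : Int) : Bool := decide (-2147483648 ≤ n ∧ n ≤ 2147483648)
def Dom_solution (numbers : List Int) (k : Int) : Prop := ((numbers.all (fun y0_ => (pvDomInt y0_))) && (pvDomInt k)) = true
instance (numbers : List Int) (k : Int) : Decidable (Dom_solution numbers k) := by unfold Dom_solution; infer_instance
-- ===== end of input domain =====

-- B replaces A's branching and repeated-subtraction reduction loop with one modulo-indexed lookup (simpler).

-- ===== PORT A =====
-- the 'while len(numbers) <= count: count -= num' loop; the '0 < num' conjunct only makes
-- the recursion total (with num = 0 the Python loop never terminates; excluded by Pre_)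
def solutionLoopA (num count : Int) : Int :=
  if 0 < num ∧ num ≤ count then solutionLoopA num (count - num) else count
termination_by count.toNat
decreasing_by omega

def solution (numbers : List Int) (k : Int) : Int :=
  let count := (k - 1) * 2
  let num : Int := numbers.length
  let count' := if count ≥ num then solutionLoopA num count else count
  (PySem.List.pyGet? numbers count').getD 0

-- ===== PORT B =====
def solution_alt (numbers : List Int) (k : Int) : Int :=
  (PySem.List.pyGet? numbers (PySem.Int.mod ((k - 1) * 2) numbers.length)).getD 0

-- ===== PRECONDITION & SPEC =====
-- Pre_ excludes exactly the inputs where Python A does not return a value: empty numbers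
-- (IndexError, or an infinite loop when (k-1)*2 ≥ 0) and (k-1)*2 < -len(numbers) (IndexError).
def Pre_solution (numbers : List Int) (k : Int) : Prop :=
  numbers ≠ [] ∧ -(numbers.length : Int) ≤ (k - 1) * 2
instance (numbers : List Int) (k : Int) : Decidable (Pre_solution numbers k) := by
  unfold Pre_solution; infer_instance
def pvWitness_solution : List Int × Int := ([10, 20, 30], 4)

-- On non-empty numbers with (k-1)*2 < -len(numbers), A raises IndexError while B returns
-- numbers[((k-1)*2) % len(numbers)].
def Raises_solution (numbers : List Int) (k : Int) : Prop :=
  numbers ≠ [] ∧ (k - 1) * 2 < -(numbers.length : Int)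
instance (numbers : List Int) (k : Int) : Decidable (Raises_solution numbers k) := by
  unfold Raises_solution; infer_instance
def pvRaiseWitness_solution : List Int × Int := ([5], 0)
def pvRaiseWitnessOut_solution : Int := 5

def Spec_solution (numbers : List Int) (k : Int) (out : Int) : Prop := out = solution_alt numbers k
instance (numbers : List Int) (k : Int) (out : Int) : Decidable (Spec_solution numbers k out) := by unfold Spec_solution; infer_instance

-- ===== CLAIM (what is proved, stated in full; the proofs are below) =====
def Claim_equal_solution : Prop := ∀ (numbers : List Int) (k : Int), Dom_solution numbers k → Pre_solution numbers k → Spec_solution numbers k (solution numbers k)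
def Claim_raises_solution : Prop := (∀ (numbers : List Int) (k : Int), Dom_solution numbers k → Raises_solution numbers k → ¬ Pre_solution numbers k) ∧ (Dom_solution (pvRaiseWitness_solution.1) (pvRaiseWitness_solution.2) ∧ Raises_solution (pvRaiseWitness_solution.1) (pvRaiseWitness_solution.2) ∧ solution_alt (pvRaiseWitness_solution.1) (pvRaiseWitness_solution.2) = pvRaiseWitnessOut_solution)

-- ===== LEMMAS AND PROOFS =====
-- A's while loop computes count % num for positive num and nonnegative count
theorem solutionLoopA_eq_emod (num : Int) (hnum : 0 < num) :
    ∀ count : Int, 0 ≤ count → solutionLoopA num count = count % num := by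
  intro count hc
  induction h : count.toNat using Nat.strong_induction_on generalizing count with
  | _ n ih =>
    rw [solutionLoopA]
    by_cases hle : num ≤ count
    · simp only [hnum, hle, and_self, if_true]
      rw [ih ((count - num).toNat) (by omega) _ (by omega) rfl]
      exact Int.sub_emod_right count num
    · simp only [hnum, hle, and_false, if_false]
      exact (Int.emod_eq_of_lt hc (by omega)).symm

-- Python indexing with an in-range (possibly negative) index agrees with indexing by i % n
theorem pyIdx?_emod (n : Nat) (i : Int) (h0 : 0 < n) (h1 : -(n:Int) ≤ i) (h2 : i < (n:Int)) :
    PySem.List.pyIdx? n i = PySem.List.pyIdx? n (i % (n:Int)) := by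
  have hn : (0:Int) < n := by exact_mod_cast h0
  have hm0 : 0 ≤ i % (n:Int) := Int.emod_nonneg i (by omega)
  have hm1 : i % (n:Int) < (n:Int) := Int.emod_lt_of_pos i hn
  unfold PySem.List.pyIdx?
  by_cases hi : 0 ≤ i
  · rw [Int.emod_eq_of_lt hi h2]
  · have e1 : (i + (n:Int)) % (n:Int) = i + (n:Int) := Int.emod_eq_of_lt (by omega) (by omega)
    have e2 : (i + (n:Int)) % (n:Int) = i % (n:Int) := by
      simpa using Int.add_mul_emod_self_left (a := i) (b := (n:Int)) (c := 1)
    have hmod : i % (n:Int) = i + (n:Int) := by rw [← e2, e1]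
    simp only [if_neg hi, if_pos h1, hmod]
    rw [if_pos (by omega), if_pos (by omega)]
    congr 1
    omega

-- ===== VERDICT =====
theorem solution_spec : Claim_equal_solution := by
  intro numbers k _ hpre
  obtain ⟨hne, hbound⟩ := hpre
  have hlen : 0 < (numbers.length : Int) := by
    have := List.length_pos_iff.mpr hne
    exact_mod_cast this
  unfold Spec_solution solution solution_alt
  rw [PySem.Int.mod_eq_emod_of_pos hlen]
  simp only []
  by_cases hge : (k - 1) * 2 ≥ (numbers.length : Int)
  · rw [if_pos hge, solutionLoopA_eq_emod _ hlen _ (by omega)]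
  · rw [if_neg hge]
    unfold PySem.List.pyGet?
    rw [pyIdx?_emod numbers.length _ (by omega) hbound (by omega)]

@[simp] theorem solution_raises : Claim_raises_solution := by
  unfold Claim_raises_solution
  refine ⟨fun numbers k _ hr hp => absurd hp.2 (not_le.mpr hr.2), by decide, by decide, by decide⟩
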